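-- pv_equiv track=rewrite | github.com/afalk42/ntpwatch | src/ntpwatch/ntp/control.py | _split_vars
-- ===== SOURCE A (Python) =====
-- def _split_vars(text: str) -> list[str]:
--     """Split variable list handling quoted values with commas."""
--     parts = []
--     current = []
--     in_quotes = False
--
--     for char in text:
--         if char == '"':
--             in_quotes = not in_quotes
--             current.append(char)
--         elif char == "," and not in_quotes:
--             parts.append("".join(current))
--             current = []
--         else:
--             current.append(char)
--
--     if current:
--         parts.append("".join(current))
--
--     return parts
-- ===== SOURCE B (Python) =====
-- def _split_vars(text: str) -> list[str]:
--     """Split variable list handling quoted values with commas."""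
--     out = []
--     buf = None
--     for seg in text.split(','):
--         joined = seg if buf is None else buf + ',' + seg
--         if joined.count('"') % 2 == 0:
--             out.append(joined)
--             buf = None
--         else:
--             buf = joined
--     if buf is not None:
--         out.append(buf)
--     if out and out[-1] == '':
--         out.pop()
--     return out
-- ===== Notes on version B (the rewrite author's own statement) =====
-- stated objective: faster
-- what changed: B replaces A's char-by-char loop with a quote-toggle flag by splitting on ',' first and re-joining adjacent segments while the accumulated piece has an odd number of '"' characters, then dropping a single trailing empty field.
import Mathlib
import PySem

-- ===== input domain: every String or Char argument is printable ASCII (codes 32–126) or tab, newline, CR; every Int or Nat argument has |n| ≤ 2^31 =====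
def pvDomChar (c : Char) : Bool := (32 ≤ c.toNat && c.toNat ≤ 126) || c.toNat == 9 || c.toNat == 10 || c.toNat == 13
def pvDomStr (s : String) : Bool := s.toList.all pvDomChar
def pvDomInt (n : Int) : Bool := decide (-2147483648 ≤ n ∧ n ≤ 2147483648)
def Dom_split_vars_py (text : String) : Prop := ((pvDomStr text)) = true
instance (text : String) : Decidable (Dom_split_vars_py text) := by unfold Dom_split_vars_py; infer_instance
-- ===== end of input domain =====

-- B splits on ',' and re-joins segments while the buffer holds an odd number of quotes
-- (then drops one trailing empty field), instead of A's char loop with a quote flag: alternative decomposition.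


-- ===== PORT A =====
-- literal port of A: fold over the characters with state (parts, current, in_quotes);
-- "".join(current) is String.ofList current.
def splitVarsAStep (st : List String × List Char × Bool) (c : Char) :
    List String × List Char × Bool :=
  if c = '"' then (st.1, st.2.1 ++ [c], !st.2.2)
  else if c = ',' ∧ st.2.2 = false then (st.1 ++ [String.ofList st.2.1], [], st.2.2)
  else (st.1, st.2.1 ++ [c], st.2.2)

def split_vars_py (text : String) : List String :=
  let st := text.toList.foldl splitVarsAStep ([], [], false)
  if st.2.1 ≠ [] then st.1 ++ [String.ofList st.2.1] else st.1

-- ===== PORT B =====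
-- literal port of Source B: text.split(',') is PySem.Chars.splitOn on the code points
-- (sep nonempty), joined.count('"') is PySem.Chars.count; Strings are made at the end.
def splitVarsBStep (st : List (List Char) × Option (List Char)) (seg : List Char) :
    List (List Char) × Option (List Char) :=
  let joined := match st.2 with
    | none => seg
    | some b => b ++ ',' :: seg
  if PySem.Chars.count joined ['"'] % 2 = 0 then (st.1 ++ [joined], none)
  else (st.1, some joined)

def split_vars_py_alt (text : String) : List String :=
  let segs := PySem.Chars.splitOn text.toList [',']
  let st := segs.foldl splitVarsBStep ([], none)
  let out := match st.2 with
    | none => st.1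
    | some b => st.1 ++ [b]
  let out2 := if out ≠ [] ∧ out.getLast? = some [] then out.dropLast else out
  out2.map String.ofList

-- ===== PRECONDITION & SPEC =====
def Spec_split_vars_py (text : String) (out : List String) : Prop := out = split_vars_py_alt text
instance (text : String) (out : List String) : Decidable (Spec_split_vars_py text out) := by unfold Spec_split_vars_py; infer_instance

-- ===== CLAIM (what is proved, stated in full; the proofs are below) =====
def Claim_equal_split_vars_py : Prop := ∀ (text : String), Dom_split_vars_py text → Spec_split_vars_py text (split_vars_py text)

-- ===== LEMMAS AND PROOFS =====

-- common reference computation: flushed fields and the final pending buffer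
def svCore : List Char → List Char → List (List Char) × List Char
  | [], cur => ([], cur)
  | c :: rest, cur =>
    if c = ',' ∧ cur.count '"' % 2 = 0 then
      let r := svCore rest []
      (cur :: r.1, r.2)
    else svCore rest (cur ++ [c])

-- structural split on ','
def svSplit : List Char → List (List Char)
  | [] => [[]]
  | c :: rest =>
    if c = ',' then [] :: svSplit rest
    else match svSplit rest with
      | [] => [[c]]
      | h :: t => (c :: h) :: t

def svMapHd (f : List Char → List Char) : List (List Char) → List (List Char)
  | [] => []
  | h :: t => f h :: t

lemma svMapHd_id (L : List (List Char)) : svMapHd (fun s => [] ++ s) L = L := by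
  cases L <;> simp [svMapHd]

lemma svSplit_ne_nil (l : List Char) : svSplit l ≠ [] := by
  cases l with
  | nil => simp [svSplit]
  | cons c rest =>
    by_cases hc : c = ','
    · simp [svSplit, hc]
    · simp only [svSplit, if_neg hc]
      cases svSplit rest <;> simp

lemma svCount_go (sub : List Char) (hs : sub = ['"']) :
    ∀ (l : List Char) (fuel acc : Nat), l.length ≤ fuel →
      PySem.Chars.count.go sub fuel l acc = acc + l.count '"' := by
  intro l
  induction l with
  | nil => intro fuel acc _; cases fuel <;> simp [PySem.Chars.count.go]
  | cons c t ih =>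
    intro fuel acc h
    cases fuel with
    | zero => simp at h
    | succ f =>
      rw [PySem.Chars.count.go]
      subst hs
      by_cases hc : c = '"'
      · subst hc
        simp [List.isPrefixOf, ih f (acc + 1) (by simpa using h)]
        omega
      · simp [List.isPrefixOf, hc, ih f acc (by simpa using h)]
        intro h'
        exact absurd h'.symm hc

lemma svCount (l : List Char) : PySem.Chars.count l ['"'] = l.count '"' := by
  simpa using svCount_go ['"'] rfl l l.length 0 le_rfl

lemma svSplitOn_go :
    ∀ (fuel : Nat) (l cur : List Char) (acc : List (List Char)), l.length < fuel →
      PySem.Chars.splitOn.go [','] fuel l cur acc =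
        acc.reverse ++ svMapHd (fun s => cur.reverse ++ s) (svSplit l) := by
  intro fuel
  induction fuel with
  | zero => intro l cur acc h; omega
  | succ f ih =>
    intro l cur acc h
    cases l with
    | nil => simp [PySem.Chars.splitOn.go, svSplit, svMapHd]
    | cons c rest =>
      rw [PySem.Chars.splitOn.go]
      by_cases hc : c = ','
      · subst hc
        simp only [List.isPrefixOf]
        rw [if_pos (by decide)]
        have hdrop : List.drop [','].length (',' :: rest) = rest := by simp
        rw [hdrop, ih rest [] (cur.reverse :: acc) (by simpa using h)]
        simp [svSplit, svMapHd]
        cases svSplit rest <;> rfl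
      · rw [if_neg (by simp [List.isPrefixOf]; exact fun h' => hc h'.symm)]
        rw [ih rest (c :: cur) acc (by simpa using h)]
        simp only [svSplit, if_neg hc]
        congr 1
        cases hs : svSplit rest with
        | nil => exact absurd hs (svSplit_ne_nil rest)
        | cons hh tt => simp [svMapHd]

lemma svSplitOn (l : List Char) : PySem.Chars.splitOn l [','] = svSplit l := by
  rw [PySem.Chars.splitOn, svSplitOn_go (l.length + 1) l [] [] (by omega)]
  cases svSplit l <;> simp [svMapHd]

-- the in_quotes flag of A equals the quote parity of `current`
def svOdd (cur : List Char) : Bool := decide (cur.count '"' % 2 = 1)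

lemma svOdd_append_quote (cur : List Char) : svOdd (cur ++ ['"']) = !svOdd cur := by
  by_cases h : List.count '"' cur % 2 = 1 <;>
    simp [svOdd, List.count_append, h] <;> omega

lemma svOdd_append_other (cur : List Char) (c : Char) (hc : c ≠ '"') :
    svOdd (cur ++ [c]) = svOdd cur := by
  have h0 : List.count '"' [c] = 0 := List.count_eq_zero.mpr (by simp [Ne.symm hc])
  simp [svOdd, List.count_append, h0]

-- A's fold computes svCore
lemma svFoldA : ∀ (cs : List Char) (parts : List String) (cur : List Char),
    cs.foldl splitVarsAStep (parts, cur, svOdd cur) =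
      (parts ++ (svCore cs cur).1.map String.ofList, (svCore cs cur).2, svOdd (svCore cs cur).2) := by
  intro cs
  induction cs with
  | nil => intro parts cur; simp [svCore]
  | cons c rest ih =>
    intro parts cur
    rw [List.foldl_cons]
    by_cases hq : c = '"'
    · subst hq
      have hstep : splitVarsAStep (parts, cur, svOdd cur) '"' =
          (parts, cur ++ ['"'], svOdd (cur ++ ['"'])) := by
        rw [svOdd_append_quote]
        simp [splitVarsAStep]
      rw [hstep, ih parts (cur ++ ['"'])]
      have hcore : svCore ('"' :: rest) cur = svCore rest (cur ++ ['"']) := by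
        simp [svCore]
      rw [hcore]
    · by_cases hc : c = ','
      · subst hc
        by_cases hp : List.count '"' cur % 2 = 0
        · have hodd : svOdd cur = false := by simp [svOdd]; omega
          have hstep : splitVarsAStep (parts, cur, svOdd cur) ',' =
              (parts ++ [String.ofList cur], [], svOdd ([] : List Char)) := by
            have h1 : ¬ List.count '"' cur % 2 = 1 := by omega
            simp [splitVarsAStep, svOdd, h1]
          rw [hstep, ih (parts ++ [String.ofList cur]) []]
          have hcore : svCore (',' :: rest) cur =
              ((cur :: (svCore rest []).1), (svCore rest []).2) := by
            simp [svCore, hp]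
          rw [hcore]
          simp
        · have hodd : svOdd cur = true := by simp [svOdd]; omega
          have hstep : splitVarsAStep (parts, cur, svOdd cur) ',' =
              (parts, cur ++ [','], svOdd (cur ++ [','])) := by
            rw [svOdd_append_other cur ',' (by decide)]
            have h1 : List.count '"' cur % 2 = 1 := by omega
            simp [splitVarsAStep, svOdd, h1]
          rw [hstep, ih parts (cur ++ [','])]
          have hcore : svCore (',' :: rest) cur = svCore rest (cur ++ [',']) := by
            simp [svCore, hp]
          rw [hcore]
      · have hstep : splitVarsAStep (parts, cur, svOdd cur) c =
            (parts, cur ++ [c], svOdd (cur ++ [c])) := by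
          rw [svOdd_append_other cur c hq]
          simp [splitVarsAStep, hq, hc]
        rw [hstep, ih parts (cur ++ [c])]
        have hcore : svCore (c :: rest) cur = svCore rest (cur ++ [c]) := by
          simp [svCore, hc]
        rw [hcore]

-- B's fold over segments, as a pure function
def svM : List (List Char) → Option (List Char) → List (List Char) × Option (List Char)
  | [], buf => ([], buf)
  | s :: rest, buf =>
    let j := match buf with
      | none => s
      | some b => b ++ ',' :: s
    if j.count '"' % 2 = 0 then
      let r := svM rest none
      (j :: r.1, r.2)
    else svM rest (some j)

lemma svFoldB : ∀ (segs : List (List Char)) (out : List (List Char)) (buf : Option (List Char)),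
    segs.foldl splitVarsBStep (out, buf) =
      (out ++ (svM segs buf).1, (svM segs buf).2) := by
  intro segs
  induction segs with
  | nil => intro out buf; simp [svM]
  | cons s rest ih =>
    intro out buf
    rw [List.foldl_cons]
    cases buf with
    | none =>
      by_cases hp : s.count '"' % 2 = 0
      · have : splitVarsBStep (out, none) s = (out ++ [s], none) := by
          simp [splitVarsBStep, svCount, hp]
        rw [this, ih]
        simp [svM, hp]
      · have : splitVarsBStep (out, none) s = (out, some s) := by
          simp [splitVarsBStep, svCount, hp]
        rw [this, ih]
        simp [svM, hp]
    | some b =>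
      have hps : List.count '"' (b ++ ',' :: s) = List.count '"' b + List.count '"' s := by
        simp [List.count_append]
      by_cases hp : (b ++ ',' :: s).count '"' % 2 = 0
      · have hp' : (List.count '"' b + List.count '"' s) % 2 = 0 := by
          rw [← hps]; simpa using hp
        have hbs : splitVarsBStep (out, some b) s = (out ++ [b ++ ',' :: s], none) := by
          simp [splitVarsBStep, svCount, hp']
        rw [hbs, ih]
        simp [svM, hp']
      · have hp' : (List.count '"' b + List.count '"' s) % 2 = 1 := by
          rw [← hps]
          have := hp
          simp only [List.count_append] at this ⊢
          omega
        have hbs : splitVarsBStep (out, some b) s = (out, some (b ++ ',' :: s)) := by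
          simp [splitVarsBStep, svCount, hp']
        rw [hbs, ih]
        simp [svM, hp']

def svAsm (r : List (List Char) × Option (List Char)) : List (List Char) :=
  r.1 ++ (match r.2 with | none => [] | some b => [b])

-- main bridge: B's merge over the split equals A's core scan
lemma svMain : ∀ (cs : List Char) (buf : Option (List Char)) (a : List Char),
    svAsm (svM (svMapHd (fun s => a ++ s) (svSplit cs)) buf) =
      (svCore cs (match buf with | none => a | some b => b ++ ',' :: a)).1 ++
        [(svCore cs (match buf with | none => a | some b => b ++ ',' :: a)).2] := by
  intro cs
  induction cs with
  | nil =>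
    intro buf a
    cases buf with
    | none =>
      by_cases hp : List.count '"' a % 2 = 0 <;>
        simp [svSplit, svMapHd, svM, svAsm, svCore, hp]
    | some b =>
      by_cases hp : (List.count '"' b + List.count '"' a) % 2 = 0 <;>
        simp [svSplit, svMapHd, svM, svAsm, svCore, List.count_append, hp]
  | cons c rest ih =>
    intro buf a
    by_cases hc : c = ','
    · subst hc
      have hsplit : svMapHd (fun s => a ++ s) (svSplit (',' :: rest)) = a :: svSplit rest := by
        simp [svSplit, svMapHd]
      rw [hsplit]
      cases buf with
      | none =>
        by_cases hp : List.count '"' a % 2 = 0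
        · have hstep : svM (a :: svSplit rest) none =
              (a :: (svM (svSplit rest) none).1, (svM (svSplit rest) none).2) := by
            simp only [svM]
            rw [if_pos hp]
          rw [hstep]
          have hih := ih none []
          rw [svMapHd_id] at hih
          have hcore : svCore (',' :: rest) a =
              ((a :: (svCore rest []).1), (svCore rest []).2) := by
            simp only [svCore]
            rw [if_pos (⟨trivial, hp⟩ : True ∧ _)]
          rw [hcore]
          simp only [svAsm] at hih ⊢
          simp only [List.cons_append]
          rw [hih]
        · have hstep : svM (a :: svSplit rest) none = svM (svSplit rest) (some a) := by
            simp only [svM]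
            rw [if_neg hp]
          rw [hstep]
          have hih := ih (some a) []
          rw [svMapHd_id] at hih
          have hcore : svCore (',' :: rest) a = svCore rest (a ++ [',']) := by
            simp only [svCore]
            rw [if_neg (fun h => hp h.2)]
          rw [hcore]
          simpa using hih
      | some b =>
        have hps : List.count '"' (b ++ ',' :: a) = List.count '"' b + List.count '"' a := by
          simp [List.count_append]
        by_cases hp : List.count '"' (b ++ ',' :: a) % 2 = 0
        · have hstep : svM (a :: svSplit rest) (some b) =
              ((b ++ ',' :: a) :: (svM (svSplit rest) none).1, (svM (svSplit rest) none).2) := by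
            simp only [svM]
            rw [if_pos hp]
          rw [hstep]
          have hih := ih none []
          rw [svMapHd_id] at hih
          have hcore : svCore (',' :: rest) (b ++ ',' :: a) =
              (((b ++ ',' :: a) :: (svCore rest []).1), (svCore rest []).2) := by
            simp only [svCore]
            rw [if_pos (⟨trivial, hp⟩ : True ∧ _)]
          rw [hcore]
          simp only [svAsm] at hih ⊢
          simp only [List.cons_append]
          rw [hih]
        · have hstep : svM (a :: svSplit rest) (some b) =
              svM (svSplit rest) (some (b ++ ',' :: a)) := by
            simp only [svM]
            rw [if_neg hp]
          rw [hstep]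
          have hih := ih (some (b ++ ',' :: a)) []
          rw [svMapHd_id] at hih
          have hcore : svCore (',' :: rest) (b ++ ',' :: a) =
              svCore rest ((b ++ ',' :: a) ++ [',']) := by
            simp only [svCore]
            rw [if_neg (fun h => hp h.2)]
          rw [hcore]
          simpa using hih
    · have hsplit : svMapHd (fun s => a ++ s) (svSplit (c :: rest)) =
          svMapHd (fun s => (a ++ [c]) ++ s) (svSplit rest) := by
        simp only [svSplit, if_neg hc]
        cases hs : svSplit rest with
        | nil => exact absurd hs (svSplit_ne_nil rest)
        | cons hh tt => simp [svMapHd]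
      rw [hsplit]
      cases buf with
      | none =>
        rw [ih none (a ++ [c])]
        have hcore : svCore (c :: rest) a = svCore rest (a ++ [c]) := by
          simp only [svCore]
          rw [if_neg (fun h => hc h.1)]
        simp only [hcore]
      | some b =>
        rw [ih (some b) (a ++ [c])]
        have hj : b ++ ',' :: (a ++ [c]) = (b ++ ',' :: a) ++ [c] := by simp
        have hcore : svCore (c :: rest) (b ++ ',' :: a) = svCore rest ((b ++ ',' :: a) ++ [c]) := by
          simp only [svCore]
          rw [if_neg (fun h => hc h.1)]
        simp only [hj, hcore]

lemma svFinal (r1 : List (List Char)) (r2 : List Char) :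
    (if r2 ≠ [] then r1.map String.ofList ++ [String.ofList r2] else r1.map String.ofList) =
      List.map String.ofList
        (if (r1 ++ [r2]) ≠ [] ∧ (r1 ++ [r2]).getLast? = some [] then (r1 ++ [r2]).dropLast
         else (r1 ++ [r2])) := by
  by_cases h2 : r2 = []
  · subst h2
    simp
  · simp [h2]

-- ===== VERDICT (by name: the statement is the Claim_ definition above) =====
theorem split_vars_py_spec : Claim_equal_split_vars_py := by
  intro text _
  unfold Spec_split_vars_py
  have h0 : svOdd ([] : List Char) = false := by decide
  have hA := svFoldA text.toList [] []
  rw [h0] at hA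
  have hB := svMain text.toList none []
  rw [svMapHd_id] at hB
  simp only [svAsm] at hB
  simp only [split_vars_py, split_vars_py_alt, svSplitOn, svFoldB, hA, List.nil_append]
  cases hm : (svM (svSplit text.toList) none).2 with
  | none =>
    simp only [hm] at hB
    rw [List.append_nil] at hB
    simp only [hB]
    exact svFinal (svCore text.toList []).1 (svCore text.toList []).2
  | some b =>
    simp only [hm] at hB
    simp only [hB]
    exact svFinal (svCore text.toList []).1 (svCore text.toList []).2
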